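-- pv_equiv track=rewrite | github.com/mrdrozdov/detecting-linguistic-adjustments | read_data.py | get_inverse_mapping
-- ===== SOURCE A (Python) =====
-- def get_inverse_mapping(lst, master=None):
--     if master is None:
--         master = {}
--     inverse_lst = []
--
--     for d in lst:
--         old2master = {}
--         for k, v in d.items():
--             if k not in master:
--                 master[k] = len(master)
--             old2master[v] = master[k]
--         inverse_lst.append(old2master)
--     return master, inverse_lst
-- ===== SOURCE B (Python) =====
-- def get_inverse_mapping(lst, master=None):
--     if master is None:
--         master = {}
--     for d in lst:
--         for k in d:
--             if k not in master:
--                 master[k] = len(master)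
--     inverse_lst = [{v: master[k] for k, v in d.items()} for d in lst]
--     return master, inverse_lst
-- ===== Notes on version B (the rewrite author's own statement) =====
-- stated objective: simpler
-- what changed: B separates the work into two passes: a first pass only builds the complete master key->index table, then a comprehension builds each value->index inverse dict by looking keys up in the finished table, instead of A's single pass that interleaves index assignment with inverse construction.
import Mathlib
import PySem

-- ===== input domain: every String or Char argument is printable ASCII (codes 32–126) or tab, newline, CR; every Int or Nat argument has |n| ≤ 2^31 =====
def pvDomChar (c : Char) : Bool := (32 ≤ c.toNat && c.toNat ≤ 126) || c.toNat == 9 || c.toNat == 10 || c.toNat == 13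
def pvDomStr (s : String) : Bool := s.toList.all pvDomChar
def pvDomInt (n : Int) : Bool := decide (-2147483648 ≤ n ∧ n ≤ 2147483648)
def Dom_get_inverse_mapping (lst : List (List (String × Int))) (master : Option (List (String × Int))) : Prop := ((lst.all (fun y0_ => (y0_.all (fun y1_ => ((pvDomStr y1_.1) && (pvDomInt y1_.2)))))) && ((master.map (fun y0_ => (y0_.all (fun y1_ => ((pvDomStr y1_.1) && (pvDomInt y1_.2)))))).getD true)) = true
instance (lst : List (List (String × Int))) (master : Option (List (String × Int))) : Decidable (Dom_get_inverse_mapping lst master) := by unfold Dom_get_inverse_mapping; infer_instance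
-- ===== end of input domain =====

-- B builds the complete master index in a first pass and the inverse dicts in a second; same cost, plainer structure.
-- Both Pythons mutate the caller's `master` dict in place; the equivalence proved here is about the RETURN value.

-- ===== PORT A =====
-- A's single pass: the state is (master so far, inverse_lst so far); `old2master[v] = master[k]`
-- reads master right after the possible insertion, so the `if` expression appears again for that read.
def get_inverse_mapping (lst : List (List (String × Int))) (master : Option (List (String × Int))) : (List (String × Int)) × (List (List (Int × Int))) :=
  let r := lst.foldl (fun (st : PySem.Dict String Int × List (List (Int × Int))) d =>
      ((d.foldl (fun (q : PySem.Dict String Int × PySem.Dict Int Int) kv =>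
          (if q.1.contains kv.1 then q.1 else q.1.insert kv.1 (q.1.size : Int),
           q.2.insert kv.2 ((if q.1.contains kv.1 then q.1 else q.1.insert kv.1 (q.1.size : Int)).getD kv.1 0)))
          (st.1, PySem.Dict.empty)).1,
       st.2 ++ [(d.foldl (fun (q : PySem.Dict String Int × PySem.Dict Int Int) kv =>
          (if q.1.contains kv.1 then q.1 else q.1.insert kv.1 (q.1.size : Int),
           q.2.insert kv.2 ((if q.1.contains kv.1 then q.1 else q.1.insert kv.1 (q.1.size : Int)).getD kv.1 0)))
          (st.1, PySem.Dict.empty)).2.items]))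
    (PySem.Dict.mk (master.getD []), [])
  (r.1.items, r.2)

-- ===== PORT B =====
def get_inverse_mapping_alt (lst : List (List (String × Int))) (master : Option (List (String × Int))) : (List (String × Int)) × (List (List (Int × Int))) :=
  let m := lst.foldl (fun m d => d.foldl (fun (m : PySem.Dict String Int) kv =>
      if m.contains kv.1 then m else m.insert kv.1 (m.size : Int)) m)
    (PySem.Dict.mk (master.getD []))
  (m.items, lst.map (fun d =>
    (d.foldl (fun (o : PySem.Dict Int Int) kv => o.insert kv.2 (m.getD kv.1 0)) PySem.Dict.empty).items))

-- ===== PRECONDITION & SPEC =====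
def Spec_get_inverse_mapping (lst : List (List (String × Int))) (master : Option (List (String × Int))) (out : (List (String × Int)) × (List (List (Int × Int)))) : Prop := out = get_inverse_mapping_alt lst master
instance (lst : List (List (String × Int))) (master : Option (List (String × Int))) (out : (List (String × Int)) × (List (List (Int × Int)))) : Decidable (Spec_get_inverse_mapping lst master out) := by unfold Spec_get_inverse_mapping; infer_instance

-- ===== CLAIM (what is proved, stated in full; the proofs are below) =====
def Claim_equal_get_inverse_mapping : Prop := ∀ (lst : List (List (String × Int))) (master : Option (List (String × Int))), Dom_get_inverse_mapping lst master → Spec_get_inverse_mapping lst master (get_inverse_mapping lst master)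

-- ===== LEMMAS AND PROOFS =====

/-- The `if k not in master: master[k] = len(master)` step, shared by both Pythons. -/
def pvS1 (m : PySem.Dict String Int) (kv : String × Int) : PySem.Dict String Int :=
  if m.contains kv.1 then m else m.insert kv.1 (m.size : Int)

def pvAdd (m : PySem.Dict String Int) (d : List (String × Int)) : PySem.Dict String Int :=
  d.foldl pvS1 m

/-- `M` extends `m`: every key of `m` is in `M` with the same value. -/
def pvExt (m M : PySem.Dict String Int) : Prop :=
  ∀ k, m.contains k = true → M.contains k = true ∧ M.getD k 0 = m.getD k 0

theorem pvExt_refl (m : PySem.Dict String Int) : pvExt m m := fun _ h => ⟨h, rfl⟩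

theorem pvExt_trans {a b c : PySem.Dict String Int} (h1 : pvExt a b) (h2 : pvExt b c) : pvExt a c := by
  intro k hk
  obtain ⟨hb, he⟩ := h1 k hk
  obtain ⟨hc, he'⟩ := h2 k hb
  exact ⟨hc, he'.trans he⟩

theorem pvExt_s1 (m : PySem.Dict String Int) (kv : String × Int) : pvExt m (pvS1 m kv) := by
  intro k hk
  unfold pvS1
  by_cases hc : m.contains kv.1
  · simp [hc, hk]
  · have hne : k ≠ kv.1 := by rintro rfl; simp [hk] at hc
    simp [hc, PySem.Dict.contains_insert, hk, PySem.Dict.getD_insert, hne]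

theorem pvExt_add (m : PySem.Dict String Int) (d : List (String × Int)) : pvExt m (pvAdd m d) := by
  induction d generalizing m with
  | nil => exact pvExt_refl m
  | cons kv t ih => exact pvExt_trans (pvExt_s1 m kv) (ih (pvS1 m kv))

theorem pvExt_foldl_add (m : PySem.Dict String Int) (lst : List (List (String × Int))) :
    pvExt m (lst.foldl pvAdd m) := by
  induction lst generalizing m with
  | nil => exact pvExt_refl m
  | cons d t ih => exact pvExt_trans (pvExt_add m d) (ih (pvAdd m d))

theorem pvS1_contains_self (m : PySem.Dict String Int) (kv : String × Int) :
    (pvS1 m kv).contains kv.1 = true := by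
  unfold pvS1
  by_cases hc : m.contains kv.1
  · simp [hc]
  · simp [hc, PySem.Dict.contains_insert_self]

/-- A's inner loop, against any extension `M` of its final master. -/
theorem pvInner (d : List (String × Int)) (m : PySem.Dict String Int) (o : PySem.Dict Int Int)
    (M : PySem.Dict String Int) (h : pvExt (pvAdd m d) M) :
    d.foldl (fun (q : PySem.Dict String Int × PySem.Dict Int Int) kv =>
        (if q.1.contains kv.1 then q.1 else q.1.insert kv.1 (q.1.size : Int),
         q.2.insert kv.2 ((if q.1.contains kv.1 then q.1 else q.1.insert kv.1 (q.1.size : Int)).getD kv.1 0))) (m, o)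
      = (pvAdd m d, d.foldl (fun o kv => o.insert kv.2 (M.getD kv.1 0)) o) := by
  induction d generalizing m o with
  | nil => simp [pvAdd]
  | cons kv t ih =>
    have hAdd : pvAdd m (kv :: t) = pvAdd (pvS1 m kv) t := rfl
    rw [hAdd] at h
    have hx : pvExt (pvS1 m kv) M := pvExt_trans (pvExt_add (pvS1 m kv) t) h
    have hval : M.getD kv.1 0 = (pvS1 m kv).getD kv.1 0 :=
      (hx kv.1 (pvS1_contains_self m kv)).2
    simp only [List.foldl_cons]
    rw [show (if m.contains kv.1 then m else m.insert kv.1 (m.size : Int)) = pvS1 m kv from rfl,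
        hval, hAdd]
    exact ih (pvS1 m kv) _ h

/-- A's outer loop, against any extension `M` of the final master. -/
theorem pvOuter (lst : List (List (String × Int))) (m : PySem.Dict String Int)
    (acc : List (List (Int × Int))) (M : PySem.Dict String Int)
    (h : pvExt (lst.foldl pvAdd m) M) :
    lst.foldl (fun (st : PySem.Dict String Int × List (List (Int × Int))) d =>
      ((d.foldl (fun (q : PySem.Dict String Int × PySem.Dict Int Int) kv =>
          (if q.1.contains kv.1 then q.1 else q.1.insert kv.1 (q.1.size : Int),
           q.2.insert kv.2 ((if q.1.contains kv.1 then q.1 else q.1.insert kv.1 (q.1.size : Int)).getD kv.1 0)))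
          (st.1, PySem.Dict.empty)).1,
       st.2 ++ [(d.foldl (fun (q : PySem.Dict String Int × PySem.Dict Int Int) kv =>
          (if q.1.contains kv.1 then q.1 else q.1.insert kv.1 (q.1.size : Int),
           q.2.insert kv.2 ((if q.1.contains kv.1 then q.1 else q.1.insert kv.1 (q.1.size : Int)).getD kv.1 0)))
          (st.1, PySem.Dict.empty)).2.items])) (m, acc)
      = (lst.foldl pvAdd m,
         acc ++ lst.map (fun d =>
           (d.foldl (fun (o : PySem.Dict Int Int) kv => o.insert kv.2 (M.getD kv.1 0)) PySem.Dict.empty).items)) := by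
  induction lst generalizing m acc with
  | nil => simp
  | cons d t ih =>
    have hf : t.foldl pvAdd (pvAdd m d) = (d :: t).foldl pvAdd m := rfl
    have h2 : pvExt (t.foldl pvAdd (pvAdd m d)) M := by rwa [hf]
    have h' : pvExt (pvAdd m d) M := pvExt_trans (pvExt_foldl_add (pvAdd m d) t) h2
    simp only [List.foldl_cons]
    rw [pvInner d m PySem.Dict.empty M h']
    rw [ih (pvAdd m d) _ h2, hf]
    simp

-- ===== VERDICT (by name: the statement is the Claim_ definition above) =====
theorem get_inverse_mapping_spec : Claim_equal_get_inverse_mapping := by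
  unfold Claim_equal_get_inverse_mapping
  intro lst master _
  unfold Spec_get_inverse_mapping get_inverse_mapping get_inverse_mapping_alt
  show (Prod.mk _ _) = _
  rw [pvOuter lst (PySem.Dict.mk (master.getD [])) []
      (lst.foldl pvAdd (PySem.Dict.mk (master.getD []))) (pvExt_refl _)]
  rfl
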